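-- pv_equiv track=rewrite | github.com/norbert-peters/PDVM_SYSTEM_WEB | backend/tools/phase7_control_dict_migration_suggestions.py | _choose_keep_uid
-- ===== SOURCE A (Python) =====
-- from typing import Any, Dict, List, Set, Tuple
--
-- TEMPLATE_UIDS = {
--     "55555555-5555-5555-5555-555555555555",
--     "66666666-6666-6666-6666-666666666666",
-- }
--
-- def _choose_keep_uid(uids: List[str], controls_by_uid: Dict[str, Dict[str, Any]]) -> str:
--     clean = [u for u in uids if u not in TEMPLATE_UIDS]
--     if not clean:
--         clean = list(uids)
--
--     def rank(uid: str) -> Tuple[int, str, str]: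
--         c = controls_by_uid.get(uid, {})
--         mod = str(c.get("modified_at") or "")
--         name = str(c.get("name") or "")
--         return (0 if uid not in TEMPLATE_UIDS else 1, mod, name)
--
--     return sorted(clean, key=rank, reverse=True)[0]
-- ===== SOURCE B (Python) =====
-- from typing import Any, Dict, List, Tuple
--
-- TEMPLATE_UIDS = {
--     "55555555-5555-5555-5555-555555555555",
--     "66666666-6666-6666-6666-666666666666",
-- }
--
-- def _rank(controls_by_uid: Dict[str, Dict[str, Any]], uid: str) -> Tuple[int, str, str]:
--     c = controls_by_uid.get(uid) or {}
--     return (1 if uid in TEMPLATE_UIDS else 0,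
--             str(c.get("modified_at") or ""),
--             str(c.get("name") or ""))
--
-- def _choose_keep_uid(uids: List[str], controls_by_uid: Dict[str, Dict[str, Any]]) -> str:
--     # One linear scan keeping the first element of maximal rank (strict-> replacement
--     # preserves the stable reverse sort's tie-breaking) instead of sorting.
--     clean = [u for u in uids if u not in TEMPLATE_UIDS] or list(uids)
--     best = clean[0]
--     best_rank = _rank(controls_by_uid, best)
--     for u in clean[1:]:
--         r = _rank(controls_by_uid, u)
--         if best_rank < r:
--             best, best_rank = u, r
--     return best
-- ===== Notes on version B (the rewrite author's own statement) =====
-- stated objective: alternative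
-- what changed: B replaces the reverse stable sort followed by taking element [0] with a single linear max-scan that keeps the first element of strictly maximal rank (strict < replacement reproduces the stable sort's tie-breaking).
import Mathlib
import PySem

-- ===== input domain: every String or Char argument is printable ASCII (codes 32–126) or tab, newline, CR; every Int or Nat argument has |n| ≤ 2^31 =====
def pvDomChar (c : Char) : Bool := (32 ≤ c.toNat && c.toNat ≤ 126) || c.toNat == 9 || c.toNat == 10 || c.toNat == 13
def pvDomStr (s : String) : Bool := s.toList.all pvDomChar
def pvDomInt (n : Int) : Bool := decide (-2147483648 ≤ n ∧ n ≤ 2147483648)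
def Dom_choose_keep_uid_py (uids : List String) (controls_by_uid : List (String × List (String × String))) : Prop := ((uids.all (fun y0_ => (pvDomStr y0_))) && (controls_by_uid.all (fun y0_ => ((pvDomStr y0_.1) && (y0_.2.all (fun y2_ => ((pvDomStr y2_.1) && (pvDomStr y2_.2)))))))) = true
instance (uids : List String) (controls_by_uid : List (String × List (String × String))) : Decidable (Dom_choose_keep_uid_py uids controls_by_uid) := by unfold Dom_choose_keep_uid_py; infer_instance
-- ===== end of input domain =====

-- B replaces A's reverse stable sort + [0] by one linear scan keeping the first element of
-- strictly maximal rank (objective: alternative / linear instead of sorting).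


-- shared Python primitives (not part of either algorithm)
-- TEMPLATE_UIDS, a module constant both sources use
def pvTemplateUids : PySem.Set String :=
  PySem.Set.ofList ["55555555-5555-5555-5555-555555555555", "66666666-6666-6666-6666-666666666666"]

-- Python `x or ""` for x : Optional[str] (None and "" are falsy); str() on a str is the identity — exact
def pvOrEmptyStr (o : Option String) : String :=
  match o with
  | some v => if v == "" then "" else v
  | none => ""

-- Python `x or {}` for x : Optional[dict] (None and {} are falsy) — exact
def pvOrEmptyDict (o : Option (List (String × String))) : List (String × String) :=
  match o with
  | some c => if c == [] then [] else c
  | none => []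

-- Python `<` on (int, str, str) triples: lexicographic, exact on the printable-ASCII domain
def pvTupLt3 (p q : Int × String × String) : Bool :=
  decide (p.1 < q.1 ∨ (p.1 = q.1 ∧ (p.2.1 < q.2.1 ∨ (p.2.1 = q.2.1 ∧ p.2.2 < q.2.2))))

-- ===== PORT A =====
-- rank(uid) of A: (0 if uid not in TEMPLATE_UIDS else 1, str(c.get("modified_at") or ""), str(c.get("name") or ""))
def pvRankA (controls : List (String × List (String × String))) (uid : String) : Int × String × String :=
  let c := ((PySem.Dict.mk controls).get? uid).getD []   -- controls_by_uid.get(uid, {})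
  ((if !(PySem.Set.contains pvTemplateUids uid) then 0 else 1),
   pvOrEmptyStr ((PySem.Dict.mk c).get? "modified_at"),
   pvOrEmptyStr ((PySem.Dict.mk c).get? "name"))

-- sorted(xs, key=rank, reverse=True): hand-ported because the key is a 3-tuple (PySem.List.sorted
-- covers 1- and 2-tuple keys); this is EXACTLY PySem.List.sorted's stable insertion sort with
-- before a b = key b < key a, i.e. Python's stable reverse sort.
def pvSortedRevA (controls : List (String × List (String × String))) (xs : List String) : List String :=
  xs.foldl (fun acc x =>
    PySem.List.insertBy (fun a b => pvTupLt3 (pvRankA controls b) (pvRankA controls a)) x acc) []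

def choose_keep_uid_py (uids : List String) (controls_by_uid : List (String × List (String × String))) : String :=
  let clean0 := uids.filter (fun u => !(PySem.Set.contains pvTemplateUids u))
  let clean := if clean0 == [] then uids else clean0
  PySem.List.pyGetD (pvSortedRevA controls_by_uid clean) 0 ""   -- [0]; Pre_ excludes uids = [] (IndexError)

-- ===== PORT B =====
-- _rank of B: (1 if uid in TEMPLATE_UIDS else 0, str(c.get("modified_at") or ""), str(c.get("name") or ""))
def pvRankB (controls : List (String × List (String × String))) (uid : String) : Int × String × String :=
  let c := pvOrEmptyDict ((PySem.Dict.mk controls).get? uid)   -- controls_by_uid.get(uid) or {}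
  ((if PySem.Set.contains pvTemplateUids uid then 1 else 0),
   pvOrEmptyStr ((PySem.Dict.mk c).get? "modified_at"),
   pvOrEmptyStr ((PySem.Dict.mk c).get? "name"))

def choose_keep_uid_py_alt (uids : List String) (controls_by_uid : List (String × List (String × String))) : String :=
  let clean0 := uids.filter (fun u => !(PySem.Set.contains pvTemplateUids u))
  let clean := if clean0 == [] then uids else clean0
  let best := PySem.List.pyGetD clean 0 ""   -- clean[0]; Pre_ excludes uids = [] (IndexError)
  ((PySem.List.slice clean (some 1) none).foldl
    (fun acc u =>
      let r := pvRankB controls_by_uid u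
      if pvTupLt3 acc.2 r then (u, r) else acc)
    (best, pvRankB controls_by_uid best)).1

-- ===== PRECONDITION & SPEC =====
-- Pre_ excludes exactly the empty uid list, on which both Pythons raise IndexError ([0] of an empty list)
def Pre_choose_keep_uid_py (uids : List String) (controls_by_uid : List (String × List (String × String))) : Prop := uids ≠ []
instance (uids : List String) (controls_by_uid : List (String × List (String × String))) : Decidable (Pre_choose_keep_uid_py uids controls_by_uid) := by unfold Pre_choose_keep_uid_py; infer_instance

def pvWitness_choose_keep_uid_py : List String × (List (String × List (String × String))) :=
  (["a", "b"], [("b", [("modified_at", "2024"), ("name", "x")])])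

def Spec_choose_keep_uid_py (uids : List String) (controls_by_uid : List (String × List (String × String))) (out : String) : Prop := out = choose_keep_uid_py_alt uids controls_by_uid
instance (uids : List String) (controls_by_uid : List (String × List (String × String))) (out : String) : Decidable (Spec_choose_keep_uid_py uids controls_by_uid out) := by unfold Spec_choose_keep_uid_py; infer_instance

-- ===== CLAIM (what is proved, stated in full; the proofs are below) =====
def Claim_equal_choose_keep_uid_py : Prop := ∀ (uids : List String) (controls_by_uid : List (String × List (String × String))), Dom_choose_keep_uid_py uids controls_by_uid → Pre_choose_keep_uid_py uids controls_by_uid → Spec_choose_keep_uid_py uids controls_by_uid (choose_keep_uid_py uids controls_by_uid)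

-- ===== LEMMAS AND PROOFS =====

-- the two rank helpers agree
theorem pvRank_eq (controls : List (String × List (String × String))) (uid : String) :
    pvRankA controls uid = pvRankB controls uid := by
  unfold pvRankA pvRankB pvOrEmptyDict
  cases h : PySem.Set.contains pvTemplateUids uid <;>
    cases hg : (PySem.Dict.mk controls).get? uid with
    | none => simp
    | some c =>
      by_cases hc : c = [] <;> simp [hc]

-- head of an insertBy-fold (stable reverse insertion sort) = running strict-max scan
theorem pvHead_foldl_insertBy (before : String → String → Bool) (rest : List String) :
    ∀ (acc : List String) (h : String), acc.head? = some h →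
      (rest.foldl (fun a x => PySem.List.insertBy before x a) acc).head?
        = some (rest.foldl (fun b x => if before x b then x else b) h) := by
  induction rest with
  | nil => intro acc h hacc; simpa using hacc
  | cons x rs ih =>
    intro acc h hacc
    obtain ⟨t, rfl⟩ : ∃ t, acc = h :: t := by
      cases acc with
      | nil => simp at hacc
      | cons a t =>
        simp only [List.head?_cons, Option.some.injEq] at hacc
        exact ⟨t, by rw [hacc]⟩
    simp only [List.foldl_cons]
    apply ih
    by_cases hb : before x h = true <;> simp [PySem.List.insertBy, hb]

-- the pair accumulator of B's scan carries (best, rank best); its first component is the plain scan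
theorem pvPairFold_fst (f : String → Int × String × String) (rest : List String) :
    ∀ (b : String),
      (rest.foldl (fun acc u => let r := f u; if pvTupLt3 acc.2 r then (u, r) else acc) (b, f b)).1
        = rest.foldl (fun bb x => if pvTupLt3 (f bb) (f x) then x else bb) b := by
  induction rest with
  | nil => intro b; rfl
  | cons x rs ih =>
    intro b
    simp only [List.foldl_cons]
    by_cases h : pvTupLt3 (f b) (f x) = true <;> simp [h, ih]

-- ===== VERDICT (by name: the statement is the Claim_ definition above) =====
theorem choose_keep_uid_py_spec : Claim_equal_choose_keep_uid_py := by
  intro uids controls _dom hpre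
  unfold Spec_choose_keep_uid_py
  simp only [choose_keep_uid_py, choose_keep_uid_py_alt]
  have hclean : (if (uids.filter (fun u => !(PySem.Set.contains pvTemplateUids u)) == []) = true
      then uids else uids.filter (fun u => !(PySem.Set.contains pvTemplateUids u))) ≠ [] := by
    by_cases h : (uids.filter (fun u => !(PySem.Set.contains pvTemplateUids u)) == []) = true
    · rw [if_pos h]; exact hpre
    · rw [if_neg h]; exact fun hn => h (beq_iff_eq.mpr hn)
  obtain ⟨c, rest, hcr⟩ : ∃ c rest,
      (if (uids.filter (fun u => !(PySem.Set.contains pvTemplateUids u)) == []) = true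
        then uids else uids.filter (fun u => !(PySem.Set.contains pvTemplateUids u))) = c :: rest := by
    cases h : (if (uids.filter (fun u => !(PySem.Set.contains pvTemplateUids u)) == []) = true
        then uids else uids.filter (fun u => !(PySem.Set.contains pvTemplateUids u))) with
    | nil => exact absurd h hclean
    | cons c rest => exact ⟨c, rest, rfl⟩
  rw [hcr]
  -- A side: head of the sorted list is the strict-max scan
  have hA : (pvSortedRevA controls (c :: rest)).head?
      = some (rest.foldl (fun b x =>
          if pvTupLt3 (pvRankA controls b) (pvRankA controls x) then x else b) c) := by
    unfold pvSortedRevA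
    simp only [List.foldl_cons]
    exact pvHead_foldl_insertBy _ rest _ c (by simp [PySem.List.insertBy])
  obtain ⟨tl, htl⟩ : ∃ tl, pvSortedRevA controls (c :: rest)
      = (rest.foldl (fun b x =>
          if pvTupLt3 (pvRankA controls b) (pvRankA controls x) then x else b) c) :: tl := by
    cases hs : pvSortedRevA controls (c :: rest) with
    | nil => rw [hs] at hA; simp at hA
    | cons m tl =>
      rw [hs] at hA
      simp only [List.head?_cons, Option.some.injEq] at hA
      exact ⟨tl, by rw [hA]⟩
  rw [htl, PySem.List.pyGetD_zero, List.getD_cons_zero]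
  -- B side: drop the pair accumulator, then identify the two scans
  rw [PySem.List.pyGetD_zero, List.getD_cons_zero,
      PySem.List.slice_from (c :: rest) (by norm_num : (0:Int) ≤ 1)]
  simp only [Int.toNat_one, List.drop_succ_cons, List.drop_zero]
  rw [pvPairFold_fst (pvRankB controls) rest c]
  simp only [pvRank_eq]
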